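-- pv_equiv track=rewrite | github.com/NinjaArtTech/leetcode | array/max_sum_less_than_k.py | max_sum_less_than_k
-- ===== SOURCE A (Python) =====
-- def max_sum_less_than_k(nums, k):
--     nums.sort()
--     left, right = 0, len(nums) - 1
--     max_sum = -1
--
--     while left < right:
--         current_sum = nums[left] + nums[right]
--         if current_sum < k:
--             if current_sum > max_sum:
--                 max_sum = current_sum
--             left += 1
--         else:
--             right -= 1
--
--     return max_sum
-- ===== SOURCE B (Python) =====
-- def max_sum_less_than_k(nums, k):
--     nums.sort()  # keep A's in-place sort side effect
--     best = -1
--     n = len(nums)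
--     for i in range(n):
--         for j in range(i + 1, n):
--             s = nums[i] + nums[j]
--             if s < k and s > best:
--                 best = s
--     return best
-- ===== Notes on version B (the rewrite author's own statement) =====
-- stated objective: alternative
-- what changed: Replaces the coordinated two-pointer sweep with an exhaustive scan over all index pairs keeping a running maximum of sums strictly below k.
import Mathlib
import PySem

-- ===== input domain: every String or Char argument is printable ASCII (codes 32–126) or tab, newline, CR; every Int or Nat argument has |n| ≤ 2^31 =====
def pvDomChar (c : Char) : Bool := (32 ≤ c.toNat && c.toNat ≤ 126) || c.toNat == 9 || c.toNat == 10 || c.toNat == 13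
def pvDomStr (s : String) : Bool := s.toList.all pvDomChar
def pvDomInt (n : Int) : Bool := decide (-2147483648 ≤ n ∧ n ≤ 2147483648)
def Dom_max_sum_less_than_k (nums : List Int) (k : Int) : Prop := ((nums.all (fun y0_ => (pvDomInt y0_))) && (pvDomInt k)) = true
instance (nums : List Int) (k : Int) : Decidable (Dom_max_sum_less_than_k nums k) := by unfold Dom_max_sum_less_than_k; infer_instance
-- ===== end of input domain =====

-- B replaces A's two-pointer sweep over the sorted list by an exhaustive scan of all index
-- pairs with a running maximum (alternative decomposition, not faster); both sort, and the
-- equivalence proved is about the RETURN value (both Pythons sort nums in place identically).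

-- ===== PORT A =====
-- Two-pointer while-loop of A. nums[left]/nums[right] are always in range when the loop body
-- runs (0 ≤ left < right ≤ len-1), so `getD _ 0` is exact here (Python never raises).
def pvLoopA (s : List Int) (k : Int) (l r : Nat) (m : Int) : Int :=
  if l < r then
    let cur := s.getD l 0 + s.getD r 0
    if cur < k then
      pvLoopA s k (l + 1) r (if cur > m then cur else m)
    else
      pvLoopA s k l (r - 1) m
  else m
termination_by r - l
decreasing_by all_goals omega

def max_sum_less_than_k (nums : List Int) (k : Int) : Int :=
  let s := PySem.List.sorted nums (fun x => x) false
  pvLoopA s k 0 (s.length - 1) (-1)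

-- ===== PORT B =====
-- range(i+1, n) with 0 ≤ i+1 ≤ n is ported as List.range' (i+1) (n-(i+1)); indices are in
-- range, so `getD _ 0` is exact.
def max_sum_less_than_k_alt (nums : List Int) (k : Int) : Int :=
  let s := PySem.List.sorted nums (fun x => x) false
  let n := s.length
  (List.range n).foldl (fun best i =>
    (List.range' (i + 1) (n - (i + 1))).foldl (fun b j =>
      let sum := s.getD i 0 + s.getD j 0
      if sum < k ∧ sum > b then sum else b) best) (-1)

-- ===== PRECONDITION & SPEC =====
def Spec_max_sum_less_than_k (nums : List Int) (k : Int) (out : Int) : Prop := out = max_sum_less_than_k_alt nums k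
instance (nums : List Int) (k : Int) (out : Int) : Decidable (Spec_max_sum_less_than_k nums k out) := by unfold Spec_max_sum_less_than_k; infer_instance

-- ===== CLAIM (what is proved, stated in full; the proofs are below) =====
def Claim_equal_max_sum_less_than_k : Prop := ∀ (nums : List Int) (k : Int), Dom_max_sum_less_than_k nums k → Spec_max_sum_less_than_k nums k (max_sum_less_than_k nums k)

-- ===== LEMMAS AND PROOFS =====

-- The accumulator step of B's inner loop, as a binary operation on the running max.
def pvF (k : Int) : Int → Int → Int := fun b v => if v < k ∧ v > b then v else b

-- All pair sums s[i]+s[j], i < j, in B's traversal order.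
def pvPairSums (s : List Int) : List Int :=
  ((List.range s.length).map (fun i =>
    (List.range' (i + 1) (s.length - (i + 1))).map (fun j => s.getD i 0 + s.getD j 0))).flatten

lemma alt_eq_foldF (nums : List Int) (k : Int) :
    max_sum_less_than_k_alt nums k
      = (pvPairSums (PySem.List.sorted nums (fun x => x) false)).foldl (pvF k) (-1) := by
  simp [max_sum_less_than_k_alt, pvPairSums, pvF, List.foldl_flatten, List.foldl_map]

lemma pvF_ge (k b v : Int) : b ≤ pvF k b v := by
  unfold pvF; split <;> omega

lemma pvF_ub (k b v : Int) (h : v < k) : v ≤ pvF k b v := by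
  unfold pvF; split <;> omega

lemma foldF_ge (k : Int) (L : List Int) (b : Int) : b ≤ L.foldl (pvF k) b := by
  induction L generalizing b with
  | nil => simp
  | cons x L ih => exact le_trans (pvF_ge k b x) (ih (pvF k b x))

lemma foldF_cases (k : Int) (L : List Int) (b : Int) :
    L.foldl (pvF k) b = b ∨ (L.foldl (pvF k) b ∈ L ∧ L.foldl (pvF k) b < k) := by
  induction L generalizing b with
  | nil => left; rfl
  | cons x L ih =>
    simp only [List.foldl_cons]
    rcases ih (pvF k b x) with h | h
    · rw [h]; unfold pvF; split
      · right; simp_all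
      · left; rfl
    · right; exact ⟨List.mem_cons_of_mem _ h.1, h.2⟩

lemma foldF_ub (k : Int) (L : List Int) (b : Int) :
    ∀ v ∈ L, v < k → v ≤ L.foldl (pvF k) b := by
  induction L generalizing b with
  | nil => intro v hv; simp at hv
  | cons x L ih =>
    intro v hv hvk
    rcases List.mem_cons.mp hv with rfl | hv
    · exact le_trans (pvF_ub k b v hvk) (foldF_ge k L _)
    · exact ih (pvF k b x) v hv hvk

lemma mem_pairSums (s : List Int) (v : Int) :
    v ∈ pvPairSums s ↔ ∃ i j : Nat, i < j ∧ j < s.length ∧ v = s.getD i 0 + s.getD j 0 := by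
  simp only [pvPairSums, List.mem_flatten, List.mem_map, List.mem_range]
  constructor
  · rintro ⟨L, ⟨i, hi, rfl⟩, hv⟩
    obtain ⟨j, hj, rfl⟩ := List.mem_map.mp hv
    rw [List.mem_range'_1] at hj
    exact ⟨i, j, by omega, by omega, rfl⟩
  · rintro ⟨i, j, hij, hj, rfl⟩
    refine ⟨_, ⟨i, by omega, rfl⟩, List.mem_map.mpr ⟨j, ?_, rfl⟩⟩
    rw [List.mem_range'_1]; omega

-- Sorted list is monotone under getD (indices in range).
lemma sorted_getD_mono (nums : List Int) {p q : Nat} (hpq : p ≤ q)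
    (hq : q < (PySem.List.sorted nums (fun x => x) false).length) :
    (PySem.List.sorted nums (fun x => x) false).getD p 0
      ≤ (PySem.List.sorted nums (fun x => x) false).getD q 0 := by
  rw [List.getD_eq_getElem _ _ (by omega), List.getD_eq_getElem _ _ hq]
  exact PySem.List.sorted_id_getElem_mono nums hpq hq

-- The two-pointer loop: its result is ≥ m, is m or a qualifying window pair sum, and
-- dominates every qualifying pair sum of the window [l..r].
lemma loopA_triple (s : List Int) (k : Int)
    (hs : ∀ p q : Nat, p ≤ q → q < s.length → s.getD p 0 ≤ s.getD q 0) :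
    ∀ (d l r : Nat) (m : Int), r - l ≤ d → r < s.length →
      (m ≤ pvLoopA s k l r m) ∧
      (pvLoopA s k l r m = m ∨ (pvLoopA s k l r m < k ∧ ∃ i j : Nat, l ≤ i ∧ i < j ∧ j ≤ r ∧
          pvLoopA s k l r m = s.getD i 0 + s.getD j 0)) ∧
      (∀ i j : Nat, l ≤ i → i < j → j ≤ r → s.getD i 0 + s.getD j 0 < k →
          s.getD i 0 + s.getD j 0 ≤ pvLoopA s k l r m) := by
  intro d
  induction d with
  | zero =>
    intro l r m hd _
    have hlr : ¬ l < r := by omega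
    rw [pvLoopA]; simp only [if_neg hlr]
    exact ⟨le_refl m, Or.inl (by trivial), fun i j hli hij hjr _ => absurd (by omega : l < r) hlr⟩
  | succ d ih =>
    intro l r m hd hr
    by_cases hlr : l < r
    · rw [pvLoopA]; simp only [if_pos hlr]
      by_cases hck : s.getD l 0 + s.getD r 0 < k
      · simp only [if_pos hck]
        obtain ⟨h1, h2, h3⟩ := ih (l + 1) r (if s.getD l 0 + s.getD r 0 > m then s.getD l 0 + s.getD r 0 else m) (by omega) hr
        have hmm' : m ≤ (if s.getD l 0 + s.getD r 0 > m then s.getD l 0 + s.getD r 0 else m) := by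
          split <;> omega
        have hcm' : s.getD l 0 + s.getD r 0 ≤ (if s.getD l 0 + s.getD r 0 > m then s.getD l 0 + s.getD r 0 else m) := by
          split <;> omega
        refine ⟨le_trans hmm' h1, ?_, ?_⟩
        · rcases h2 with h2 | h2
          · rw [h2]; split
            · exact Or.inr ⟨hck, l, r, le_refl l, hlr, le_refl r, rfl⟩
            · exact Or.inl rfl
          · exact Or.inr ⟨h2.1, by obtain ⟨i, j, hi, hij, hjr, he⟩ := h2.2; exact ⟨i, j, by omega, hij, hjr, he⟩⟩
        · intro i j hli hij hjr hlt
          by_cases hil : i = l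
          · subst hil
            have hjrle : s.getD j 0 ≤ s.getD r 0 := hs j r hjr hr
            calc s.getD i 0 + s.getD j 0 ≤ s.getD i 0 + s.getD r 0 := by omega
              _ ≤ _ := le_trans hcm' h1
          · exact h3 i j (by omega) hij hjr hlt
      · simp only [if_neg hck]
        obtain ⟨h1, h2, h3⟩ := ih l (r - 1) m (by omega) (by omega)
        refine ⟨h1, ?_, ?_⟩
        · rcases h2 with h2 | h2
          · exact Or.inl h2
          · exact Or.inr ⟨h2.1, by obtain ⟨i, j, hi, hij, hjr, he⟩ := h2.2; exact ⟨i, j, hi, hij, by omega, he⟩⟩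
        · intro i j hli hij hjr hlt
          by_cases hjr' : j = r
          · subst hjr'
            have : s.getD l 0 ≤ s.getD i 0 := hs l i hli (by omega)
            omega
          · exact h3 i j hli hij (by omega) hlt
    · rw [pvLoopA]; simp only [if_neg hlr]
      exact ⟨le_refl m, Or.inl (by trivial), fun i j hli hij hjr _ => absurd (by omega : l < r) hlr⟩

-- ===== VERDICT (by name: the statement is the Claim_ definition above) =====
theorem max_sum_less_than_k_spec : Claim_equal_max_sum_less_than_k := by
  intro nums k _
  unfold Spec_max_sum_less_than_k
  rw [alt_eq_foldF]
  show pvLoopA (PySem.List.sorted nums (fun x => x) false) k 0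
        ((PySem.List.sorted nums (fun x => x) false).length - 1) (-1) = _
  rcases Nat.eq_zero_or_pos (PySem.List.sorted nums (fun x => x) false).length with h0 | hpos
  · rw [List.length_eq_zero_iff.mp h0]
    rw [pvLoopA]; simp [pvPairSums]
  · set s := PySem.List.sorted nums (fun x => x) false with hs
    set b := (pvPairSums s).foldl (pvF k) (-1) with hb
    have hbge : (-1 : Int) ≤ b := foldF_ge k _ _
    have hbcases := foldF_cases k (pvPairSums s) (-1)
    have hbub := foldF_ub k (pvPairSums s) (-1)
    have hmono : ∀ p q : Nat, p ≤ q → q < s.length → s.getD p 0 ≤ s.getD q 0 :=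
      fun p q hpq hq => sorted_getD_mono nums hpq (hs ▸ hq)
    obtain ⟨h1, h2, h3⟩ := loopA_triple s k hmono (s.length - 1) 0 (s.length - 1) (-1)
      (le_refl _) (by omega)
    set a := pvLoopA s k 0 (s.length - 1) (-1) with ha
    have haub : ∀ v, v ∈ pvPairSums s → v < k → v ≤ a := by
      intro v hv hvk
      rw [mem_pairSums] at hv
      obtain ⟨i, j, hij, hj, rfl⟩ := hv
      exact h3 i j (Nat.zero_le i) hij (by omega) hvk
    have hab : a ≤ b ∨ a = -1 := by
      rcases h2 with h | ⟨hak, i, j, _, hij, hjr, he⟩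
      · exact Or.inr h
      · exact Or.inl (he ▸ hbub _ ((mem_pairSums s _).mpr ⟨i, j, hij, by omega, rfl⟩) (he ▸ hak))
    have hba : b ≤ a ∨ b = -1 := by
      rcases hbcases with h | h
      · exact Or.inr h
      · exact Or.inl (haub b h.1 h.2)
    rcases hab with hab | hab <;> rcases hba with hba | hba <;> omega
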